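-- pv_equiv track=rewrite | github.com/ioaksenenko/neural_networks | 2_untagging_submasks_maker/datamaker/type_3/main.py | matching_question_generate
-- ===== SOURCE A (Python) =====
-- import itertools
--
-- def matching_question_generate(n=1, m=1):
--     inputs = []
--     outputs = []
--     iterable = ['red', 'orange', 'yellow', 'green', 'blue', 'indigo', 'violet'][:n]
--     permutations = itertools.permutations(iterable, n)
--     for permutation in permutations:
--         input = '<p>T</p><p>T</p><p>'
--         output = ['___T_______________', '___________D_______', '___________________', '___________________']
--         for _ in range(len(permutation)):
--             output.append('___________________')
--         for i in range(len(iterable)):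
--             input += "<span style='color:" + iterable[i] + "'>T</span>" + (',' if i != len(iterable) - 1 else '')
--             output[2] += "<span style='color:" + iterable[i] + "'>T</span>" + (',' if i != len(iterable) - 1 else '')
--             for j in range(len(output)):
--                 if j != 2 and j != i + 4:
--                     output[j] += "___________________" + "".join(["_" for _ in iterable[i]]) + "__________" + ('_' if i != len(iterable) - 1 else '')
--                 elif j == i + 4:
--                     output[j] += "<span style='color:" + iterable[i] + "'>T</span>" + ('_' if i != len(iterable) - 1 else '')
--         input += '</p><p>T</p><p>'
--         for i in range(len(output)):
--             if i != 3:
--                 output[i] += '_______________'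
--             else:
--                 output[i] += '_______D_______'
--         for i in range(len(permutation)):
--             input += "<span style='color:" + permutation[i] + "'>T</span>" + (',' if i != len(permutation) - 1 else '')
--             output[2] += "<span style='color:" + permutation[i] + "'>T</span>" + (',' if i != len(permutation) - 1 else '')
--             for j in range(len(output)):
--                 if j != 2 and j != iterable.index(permutation[i]) + 4:
--                     output[j] += "___________________" + "".join(["_" for _ in permutation[i]]) + "__________" + ('_' if i != len(permutation) - 1 else '')
--                 elif j == iterable.index(permutation[i]) + 4:
--                     output[j] += "<span style='color:" + permutation[i] + "'>T</span>" + ('_' if i != len(permutation) - 1 else '')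
--         input += '</p>'
--         for i in range(len(output)):
--             output[i] += '____'
--         inputs.append(input)
--         outputs.append(output)
--     return inputs, outputs
-- ===== SOURCE B (Python) =====
-- def matching_question_generate(n=1, m=1):
--     # B: recursive backtracking. The first (colour-listing) half of every string is
--     # appended once by a recursive append_seq; then a DFS over the not-yet-used
--     # colours extends the partially built input/row strings one colour at a time,
--     # emitting a finished question at each leaf — no per-permutation re-rendering,
--     # no iterable.index scans, no in-place row mutation.
--     colors = ['red', 'orange', 'yellow', 'green', 'blue', 'indigo', 'violet'][:n]
--     L = len(colors)
--
--     def span(c):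
--         return "<span style='color:" + c + "'>T</span>"
--
--     def gap(c):
--         return '_' * (29 + len(c))
--
--     def extend(inp, rows, last, pos, c):
--         # append one colour: c at original position pos; last = no separator after
--         sep = '' if last else ','
--         u = '' if last else '_'
--         return (inp + span(c) + sep,
--                 [r + (span(c) + sep if j == 2 else
--                       span(c) + u if j == pos + 4 else
--                       gap(c) + u)
--                  for j, r in enumerate(rows)])
--
--     def append_seq(pairs, inp, rows):
--         if not pairs:
--             return inp, rows
--         (pos, c) = pairs[0]
--         rest = pairs[1:]
--         inp, rows = extend(inp, rows, not rest, pos, c)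
--         return append_seq(rest, inp, rows)
--
--     def dfs(avail, r, inp, rows):
--         if r == 0:
--             inputs.append(inp + '</p>')
--             outputs.append([row + '____' for row in rows])
--             return
--         for t in range(len(avail)):
--             pos, c = avail[t]
--             i2, r2 = extend(inp, rows, r == 1, pos, c)
--             dfs(avail[:t] + avail[t + 1:], r - 1, i2, r2)
--
--     inp = '<p>T</p><p>T</p><p>'
--     rows = ['___T_______________', '___________D_______', '___________________',
--             '___________________'] + ['___________________'] * L
--     inp, rows = append_seq(list(enumerate(colors)), inp, rows)
--     inp += '</p><p>T</p><p>'
--     rows = [r + ('_______D_______' if j == 3 else '_______________')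
--             for j, r in enumerate(rows)]
--
--     inputs, outputs = [], []
--     dfs(list(enumerate(colors)), n, inp, rows)
--     return inputs, outputs
-- ===== Notes on version B (the rewrite author's own statement) =====
-- stated objective: alternative
-- what changed: B replaces A's enumerate-all-permutations-then-render loop (which rebuilds every question from scratch with nested index loops mutating output[j] and rescanning iterable.index) by recursive backtracking: a recursive append_seq writes the shared colour-listing half once, then a DFS over the not-yet-used (position, colour) pairs extends the partially built input/row strings one colour per recursion level and emits a finished question at each leaf.
import Mathlib
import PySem

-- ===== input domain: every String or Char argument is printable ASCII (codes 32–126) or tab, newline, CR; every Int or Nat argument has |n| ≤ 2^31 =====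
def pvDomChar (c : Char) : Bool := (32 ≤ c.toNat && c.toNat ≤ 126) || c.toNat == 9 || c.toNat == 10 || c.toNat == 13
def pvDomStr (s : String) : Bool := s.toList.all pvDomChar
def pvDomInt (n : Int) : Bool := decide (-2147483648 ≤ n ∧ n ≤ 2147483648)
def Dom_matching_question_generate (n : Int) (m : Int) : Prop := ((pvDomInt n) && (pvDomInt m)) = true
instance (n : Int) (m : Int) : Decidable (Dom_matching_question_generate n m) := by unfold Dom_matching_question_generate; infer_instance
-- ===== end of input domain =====

-- B replaces A's enumerate-then-render loop (nested index loops mutating output[j],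
-- iterable.index rescans) by recursive backtracking that extends the partially built
-- strings one colour at a time and emits a finished question at each leaf.

-- ===== PORT A =====

-- the j-loop of A's body: 'for j in range(len(output)): ...' with the current
-- colour string c, target row index tgt (=2nd branch's index+4) and tail t
def aJLoop (c : String) (tgt : Int) (t : String) (output : List String) : List String :=
  (PySem.List.pyRange 0 (PySem.List.len output)).foldl (fun o j =>
    if j ≠ 2 ∧ j ≠ tgt then
      PySem.List.pySetD o j (PySem.List.pyGetD o j "" ++ "___________________" ++
        PySem.Str.join "" (c.toList.map (fun _ => "_")) ++ "__________" ++ t)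
    else if j = tgt then
      PySem.List.pySetD o j (PySem.List.pyGetD o j "" ++ "<span style='color:" ++ c ++ "'>T</span>" ++ t)
    else o) output

-- the body of A's outer 'for permutation in permutations' loop
def aBody (iterable : List String) (permutation : List String) : String × List String :=
  let input := "<p>T</p><p>T</p><p>"
  let output := ["___T_______________", "___________D_______", "___________________", "___________________"]
  let output := (PySem.List.pyRange 0 (PySem.List.len permutation)).foldl
    (fun o _ => o ++ ["___________________"]) output
  let st := (PySem.List.pyRange 0 (PySem.List.len iterable)).foldl
    (fun (st : String × List String) i =>
      (st.1 ++ "<span style='color:" ++ PySem.List.pyGetD iterable i "" ++ "'>T</span>" ++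
         (if i ≠ PySem.List.len iterable - 1 then "," else ""),
       aJLoop (PySem.List.pyGetD iterable i "") (i + 4)
         (if i ≠ PySem.List.len iterable - 1 then "_" else "")
         (PySem.List.pySetD st.2 2 (PySem.List.pyGetD st.2 2 "" ++
           "<span style='color:" ++ PySem.List.pyGetD iterable i "" ++ "'>T</span>" ++
           (if i ≠ PySem.List.len iterable - 1 then "," else ""))))) (input, output)
  let input := st.1 ++ "</p><p>T</p><p>"
  let output := st.2
  let output := (PySem.List.pyRange 0 (PySem.List.len output)).foldl (fun o i =>
    if i ≠ 3 then PySem.List.pySetD o i (PySem.List.pyGetD o i "" ++ "_______________")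
    else PySem.List.pySetD o i (PySem.List.pyGetD o i "" ++ "_______D_______")) output
  -- iterable.index(permutation[i]) never raises: the permutation's entries come
  -- from iterable, so index? is some; .getD 0 is exact there
  let st := (PySem.List.pyRange 0 (PySem.List.len permutation)).foldl
    (fun (st : String × List String) i =>
      (st.1 ++ "<span style='color:" ++ PySem.List.pyGetD permutation i "" ++ "'>T</span>" ++
         (if i ≠ PySem.List.len permutation - 1 then "," else ""),
       aJLoop (PySem.List.pyGetD permutation i "")
         ((((PySem.List.index? iterable (PySem.List.pyGetD permutation i "")).getD 0 : Nat) : Int) + 4)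
         (if i ≠ PySem.List.len permutation - 1 then "_" else "")
         (PySem.List.pySetD st.2 2 (PySem.List.pyGetD st.2 2 "" ++
           "<span style='color:" ++ PySem.List.pyGetD permutation i "" ++ "'>T</span>" ++
           (if i ≠ PySem.List.len permutation - 1 then "," else ""))))) (input, output)
  let input := st.1 ++ "</p>"
  let output := st.2
  let output := (PySem.List.pyRange 0 (PySem.List.len output)).foldl (fun o i =>
    PySem.List.pySetD o i (PySem.List.pyGetD o i "" ++ "____")) output
  (input, output)

def matching_question_generate (n : Int) (m : Int) : List String × List (List String) :=
  let iterable := PySem.List.slice ["red", "orange", "yellow", "green", "blue", "indigo", "violet"] none (some n)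
  -- itertools.permutations(iterable, n) raises ValueError for n < 0 (excluded by Pre_); toNat is exact on 0 ≤ n
  let perms := PySem.List.permutations iterable n.toNat
  perms.foldl (fun acc p => (acc.1 ++ [(aBody iterable p).1], acc.2 ++ [(aBody iterable p).2])) ([], [])

-- ===== PORT B =====

def bSpan (c : String) : String := "<span style='color:" ++ c ++ "'>T</span>"

-- '_' * (29 + len(c)); the count is ≥ 29 so toNat is exact
def bGap (c : String) : String := String.ofList (List.replicate (29 + PySem.Str.len c).toNat '_')

-- Source B's extend(inp, rows, last, pos, c)
def bExtend (inp : String) (rows : List String) (last : Bool) (pos : Int) (c : String) :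
    String × List String :=
  (inp ++ bSpan c ++ (if last then "" else ","),
   (PySem.List.enumerate rows).map (fun jr =>
     jr.2 ++ (if jr.1 = 2 then bSpan c ++ (if last then "" else ",")
              else if jr.1 = pos + 4 then bSpan c ++ (if last then "" else "_")
              else bGap c ++ (if last then "" else "_"))))

-- Source B's append_seq: recursively append a whole (position, colour) sequence
def bAppendSeq : List (Int × String) → String → List String → String × List String
  | [], inp, rows => (inp, rows)
  | pc :: rest, inp, rows =>
      bAppendSeq rest (bExtend inp rows rest.isEmpty pc.1 pc.2).1
        (bExtend inp rows rest.isEmpty pc.1 pc.2).2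

-- Source B's dfs: backtracking over the unused (position, colour) pairs; the two
-- appended lists collect the emitted questions in DFS order.
-- avail[t] never raises (t ranges over range(len(avail))); getD is exact there.
def bDfs (avail : List (Int × String)) (r : Int) (inp : String) (rows : List String) :
    List String × List (List String) :=
  if r = 0 then ([inp ++ "</p>"], [rows.map (fun row => row ++ "____")])
  else
    (List.range avail.length).attach.foldl
      (fun acc t =>
        (acc.1 ++ (bDfs (avail.take t.1 ++ avail.drop (t.1 + 1)) (r - 1)
            (bExtend inp rows (r == 1) (avail.getD t.1 (0, "")).1 (avail.getD t.1 (0, "")).2).1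
            (bExtend inp rows (r == 1) (avail.getD t.1 (0, "")).1 (avail.getD t.1 (0, "")).2).2).1,
         acc.2 ++ (bDfs (avail.take t.1 ++ avail.drop (t.1 + 1)) (r - 1)
            (bExtend inp rows (r == 1) (avail.getD t.1 (0, "")).1 (avail.getD t.1 (0, "")).2).1
            (bExtend inp rows (r == 1) (avail.getD t.1 (0, "")).1 (avail.getD t.1 (0, "")).2).2).2))
      ([], [])
termination_by avail.length
decreasing_by
  have ht := List.mem_range.mp t.2
  simp only [List.length_append, List.length_take, List.length_drop]
  omega

def matching_question_generate_alt (n : Int) (m : Int) : List String × List (List String) :=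
  let colors := PySem.List.slice ["red", "orange", "yellow", "green", "blue", "indigo", "violet"] none (some n)
  let st := bAppendSeq (PySem.List.enumerate colors) "<p>T</p><p>T</p><p>"
    (["___T_______________", "___________D_______", "___________________", "___________________"] ++
      List.replicate colors.length "___________________")
  let inp := st.1 ++ "</p><p>T</p><p>"
  let rows := (PySem.List.enumerate st.2).map (fun jr =>
    jr.2 ++ (if jr.1 = 3 then "_______D_______" else "_______________"))
  bDfs (PySem.List.enumerate colors) n inp rows

-- ===== PRECONDITION & SPEC =====
-- Pre_ excludes only n < 0, where A raises ValueError (itertools.permutations with negative r)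
def Pre_matching_question_generate (n : Int) (m : Int) : Prop := 0 ≤ n
instance (n : Int) (m : Int) : Decidable (Pre_matching_question_generate n m) := by
  unfold Pre_matching_question_generate; infer_instance
def pvWitness_matching_question_generate : Int × Int := (2, 1)

def Spec_matching_question_generate (n : Int) (m : Int) (out : List String × List (List String)) : Prop :=
  out = matching_question_generate_alt n m
instance (n : Int) (m : Int) (out : List String × List (List String)) :
    Decidable (Spec_matching_question_generate n m out) := by
  unfold Spec_matching_question_generate; infer_instance

-- ===== CLAIM (what is proved, stated in full; the proofs are below) =====
def Claim_equal_matching_question_generate : Prop := ∀ (n : Int) (m : Int),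
  Dom_matching_question_generate n m → Pre_matching_question_generate n m →
  Spec_matching_question_generate n m (matching_question_generate n m)

-- ===== LEMMAS AND PROOFS =====

-- abbreviation for ''.join(...)
def sjn : List String → String := PySem.Str.join ""

theorem sjn_nil : sjn [] = "" := by
  apply String.ext
  simp [sjn, PySem.Str.toList_join, PySem.Chars.join_nil]

theorem sjn_cons (x : String) (t : List String) : sjn (x :: t) = x ++ sjn t := by
  apply String.ext
  cases t with
  | nil =>
      simp [sjn, PySem.Str.toList_join, PySem.Chars.join_nil, PySem.Chars.join_singleton]
  | cons y t =>
      simp [sjn, PySem.Str.toList_join, PySem.Chars.join_cons_cons]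

theorem getD_set_eq {α : Type} (xs : List α) (n k : Nat) (v d : α) :
    (xs.set n v).getD k d = if k = n ∧ n < xs.length then v else xs.getD k d := by
  simp only [List.getD_eq_getElem?_getD, List.getElem?_set]
  by_cases h1 : k = n
  · subst h1; by_cases h2 : k < xs.length <;> simp [h2]
  · have h1' : ¬(n = k) := fun h => h1 h.symm
    simp [h1, h1']

theorem set_getD_self {α : Type} (xs : List α) (n : Nat) (d : α) :
    xs.set n (xs.getD n d) = xs := by
  by_cases h : n < xs.length
  · rw [List.getD_eq_getElem xs d h]
    exact List.set_getElem_self h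
  · exact List.set_eq_of_length_le (Nat.le_of_not_lt h)

theorem map_range_getD_self (o : List String) :
    (List.range o.length).map (fun k => o.getD k "") = o := by
  apply List.ext_getElem
  · simp
  · intro i h1 h2
    simp [List.getD_eq_getElem?_getD, List.getElem?_eq_getElem h2]

theorem masterNat (g : Nat → String) : ∀ (d s : Nat) (o : List String), s + d = o.length →
    List.foldl (fun acc j => acc.set j (acc.getD j "" ++ g j)) o (List.range' s d)
    = o.take s ++ (List.range' s d).map (fun k => o.getD k "" ++ g k) := by
  intro d
  induction d with
  | zero =>
      intro s o h
      simp [List.take_of_length_le (by omega : o.length ≤ s)]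
  | succ d ih =>
      intro s o h
      have hs : s < o.length := by omega
      rw [List.range'_succ]
      simp only [List.foldl_cons, List.map_cons]
      set v := o.getD s "" ++ g s with hv
      have hlen : (o.set s v).length = o.length := List.length_set
      have := ih (s + 1) (o.set s v) (by omega)
      rw [this]
      have htake : (o.set s v).take (s + 1) = o.take s ++ [v] := by
        rw [List.take_add_one, List.take_set]
        rw [List.set_eq_of_length_le (by rw [List.length_take]; omega)]
        have : (o.set s v)[s]? = some v := by
          simp [hs]
        simp [this]
      rw [htake]
      have hmap : (List.range' (s + 1) d).map (fun k => (o.set s v).getD k "" ++ g k)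
          = (List.range' (s + 1) d).map (fun k => o.getD k "" ++ g k) := by
        apply List.map_congr_left
        intro k hk
        have : s + 1 ≤ k := (List.mem_range'_1.mp hk).1
        rw [getD_set_eq]
        simp [show ¬(k = s ∧ s < o.length) by omega]
      rw [hmap, List.append_assoc]
      simp

theorem master (o : List String) (g : Int → String) :
    List.foldl (fun acc j => PySem.List.pySetD acc j (PySem.List.pyGetD acc j "" ++ g j)) o
      (PySem.List.pyRange 0 (PySem.List.len o))
    = (List.range o.length).map (fun k => o.getD k "" ++ g (k : Int)) := by
  rw [PySem.List.len_eq, PySem.List.pyRange_one]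
  have h1 : ((o.length : Int) - 0).toNat = o.length := by omega
  rw [h1, List.foldl_map]
  have h2 : ∀ (acc : List String) (k : Nat),
      PySem.List.pySetD acc ((0 : Int) + (k : Int)) (PySem.List.pyGetD acc ((0 : Int) + (k : Int)) "" ++ g ((0 : Int) + (k : Int)))
      = acc.set k (acc.getD k "" ++ g (k : Int)) := by
    intro acc k
    rw [zero_add, PySem.List.pySetD_natCast, PySem.List.pyGetD_natCast]
  rw [PySem.List.foldl_congr_mem _ _ _ _ (by intro acc x _; exact h2 acc x)]
  rw [List.range_eq_range']
  rw [masterNat (fun k => g (k : Nat)) o.length 0 o (by omega)]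
  simp

theorem pairfold {α : Type} (l : List α) (aF : α → String) (bF : α → Nat → String) :
    ∀ (s0 : String) (o0 : List String),
    List.foldl (fun st x => (st.1 ++ aF x, (List.range st.2.length).map (fun k => st.2.getD k "" ++ bF x k))) (s0, o0) l
    = (s0 ++ sjn (l.map aF), (List.range o0.length).map (fun k => o0.getD k "" ++ sjn (l.map (fun x => bF x k)))) := by
  induction l with
  | nil =>
      intro s0 o0
      simp only [List.foldl_nil, List.map_nil, sjn_nil, String.append_empty]
      rw [map_range_getD_self]
  | cons x t ih =>
      intro s0 o0
      simp only [List.foldl_cons, List.map_cons, sjn_cons]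
      rw [ih, Prod.mk.injEq]
      refine ⟨by rw [String.append_assoc], ?_⟩
      · have hlen : ((List.range o0.length).map (fun k => o0.getD k "" ++ bF x k)).length = o0.length := by simp
        rw [hlen]
        apply List.map_congr_left
        intro k hk
        have hk' : k < o0.length := List.mem_range.mp hk
        rw [PySem.List.getD_map_range _ _ _ _ hk', String.append_assoc]

theorem mem_permutations {α : Type} : ∀ (r : Nat) (xs p : List α),
    p ∈ PySem.List.permutations xs r → p.length = r ∧ ∀ c ∈ p, c ∈ xs := by
  intro r
  induction r with
  | zero =>
      intro xs p hp
      simp only [PySem.List.permutations, List.mem_singleton] at hp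
      subst hp; simp
  | succ r ih =>
      intro xs p hp
      simp only [PySem.List.permutations, List.mem_flatMap, List.mem_range] at hp
      obtain ⟨i, hi, hp⟩ := hp
      rw [List.getElem?_eq_getElem hi] at hp
      simp only [List.mem_map] at hp
      obtain ⟨q, hq, rfl⟩ := hp
      obtain ⟨hql, hqm⟩ := ih (xs.eraseIdx i) q hq
      refine ⟨by simp [hql], ?_⟩
      intro c hc
      rcases List.mem_cons.mp hc with rfl | hc
      · exact List.getElem_mem _
      · exact List.mem_of_mem_eraseIdx (hqm c hc)

theorem permutations_nil {α : Type} : ∀ (r : Nat) (xs : List α), xs.length < r →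
    PySem.List.permutations xs r = [] := by
  intro r
  induction r with
  | zero => intro xs h; omega
  | succ r ih =>
      intro xs h
      simp only [PySem.List.permutations]
      apply List.flatMap_eq_nil_iff.mpr
      intro i hi
      have hi' : i < xs.length := List.mem_range.mp hi
      rw [List.getElem?_eq_getElem hi']
      rw [ih (xs.eraseIdx i) (by rw [List.length_eraseIdx]; split <;> omega)]
      simp

theorem permutations_map {α β : Type} (f : α → β) : ∀ (r : Nat) (xs : List α),
    PySem.List.permutations (xs.map f) r = (PySem.List.permutations xs r).map (List.map f) := by
  intro r
  induction r with
  | zero => intro xs; simp [PySem.List.permutations]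
  | succ r ih =>
      intro xs
      simp only [PySem.List.permutations, List.length_map, List.map_flatMap]
      apply List.flatMap_congr ?_
      intro i hi
      have hi' : i < xs.length := List.mem_range.mp hi
      rw [List.getElem?_eq_getElem hi', List.getElem?_map, List.getElem?_eq_getElem hi']
      simp only [Option.map_some]
      rw [List.eraseIdx_map, ih]
      simp [List.map_map, Function.comp]

theorem sjn_underscore (l : List Char) :
    sjn (l.map (fun _ => "_")) = String.ofList (List.replicate l.length '_') := by
  induction l with
  | nil => rw [List.map_nil, sjn_nil, List.length_nil, List.replicate_zero]
  | cons c t ih =>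
      simp only [List.map_cons, sjn_cons, ih, List.length_cons]
      apply String.ext
      rw [List.replicate_succ]
      simp [String.toList_append]

theorem pySetD_self (o : List String) (j : Int) (hj : 0 ≤ j) :
    PySem.List.pySetD o j (PySem.List.pyGetD o j "") = o := by
  obtain ⟨j0, rfl⟩ : ∃ j0 : Nat, j = (j0 : Int) := ⟨j.toNat, by omega⟩
  rw [PySem.List.pySetD_natCast, PySem.List.pyGetD_natCast, set_getD_self]

theorem two_eq_cast : (2 : Int) = ((2 : Nat) : Int) := rfl

theorem aJLoop_eq (c : String) (tgt : Int) (htgt : 4 ≤ tgt) (t : String) (st2 : List String) (v : String) :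
    aJLoop c tgt t (PySem.List.pySetD st2 2 (PySem.List.pyGetD st2 2 "" ++ v)) =
    (List.range st2.length).map (fun k => st2.getD k "" ++
      (if k = 2 then v
       else if (k : Int) = tgt then "<span style='color:" ++ (c ++ ("'>T</span>" ++ t))
       else "___________________" ++
         (PySem.Str.join "" (c.toList.map (fun _ => "_")) ++ ("__________" ++ t)))) := by
  unfold aJLoop
  rw [PySem.List.foldl_congr_mem _ _
    (fun o j => PySem.List.pySetD o j (PySem.List.pyGetD o j "" ++
      (if j ≠ 2 ∧ j ≠ tgt then
         "___________________" ++ (PySem.Str.join "" (c.toList.map (fun _ => "_")) ++ ("__________" ++ t))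
       else if j = tgt then "<span style='color:" ++ (c ++ ("'>T</span>" ++ t)) else ""))) _ ?hcongr]
  case hcongr =>
    intro o j hj
    have hj0 : 0 ≤ j := by
      rw [PySem.List.len_eq] at hj
      exact (PySem.List.mem_pyRange_one.mp hj).1
    by_cases h1 : j ≠ 2 ∧ j ≠ tgt
    · simp only [if_pos h1, String.append_assoc]
    · by_cases h2 : j = tgt
      · simp only [if_neg h1, if_pos h2, String.append_assoc]
      · simp only [if_neg h1, if_neg h2, String.append_empty]
        rw [pySetD_self _ _ hj0]
  rw [master]
  rw [show (PySem.List.pySetD st2 2 (PySem.List.pyGetD st2 2 "" ++ v)).length = st2.length from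
    PySem.List.length_pySetD _ _ _]
  apply List.map_congr_left
  intro k hk
  have hk' : k < st2.length := List.mem_range.mp hk
  rw [two_eq_cast, PySem.List.pySetD_natCast, PySem.List.pyGetD_natCast, getD_set_eq]
  simp only [Nat.cast_ofNat]
  by_cases h2 : k = 2
  · subst h2
    have h2l : 2 < st2.length := hk'
    rw [if_pos ⟨rfl, h2l⟩]
    have hne1 : ¬((2 : Int) ≠ 2 ∧ (2 : Int) ≠ tgt) := by omega
    have hne2 : ¬((2 : Int) = tgt) := by omega
    rw [if_pos rfl]
    simp only [Nat.cast_ofNat, if_neg hne1, if_neg hne2, String.append_empty]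
  · rw [if_neg (by omega : ¬(k = 2 ∧ 2 < st2.length)), if_neg h2]
    have hc2 : ((k : Int) ≠ 2) := by omega
    by_cases h3 : (k : Int) = tgt
    · rw [if_neg (by omega : ¬((k:Int) ≠ 2 ∧ (k:Int) ≠ tgt)), if_pos h3, if_pos h3]
    · rw [if_pos ⟨hc2, h3⟩, if_neg h3]

theorem stageLoop_eq (q : List String) (tgt : Int → Int) (htgt : ∀ i, 0 ≤ i → 4 ≤ tgt i) :
    ∀ (s0 : String) (o0 : List String),
    (PySem.List.pyRange 0 (PySem.List.len q)).foldl
      (fun (st : String × List String) i =>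
        (st.1 ++ "<span style='color:" ++ PySem.List.pyGetD q i "" ++ "'>T</span>" ++
           (if i ≠ PySem.List.len q - 1 then "," else ""),
         aJLoop (PySem.List.pyGetD q i "") (tgt i)
           (if i ≠ PySem.List.len q - 1 then "_" else "")
           (PySem.List.pySetD st.2 2 (PySem.List.pyGetD st.2 2 "" ++
             "<span style='color:" ++ PySem.List.pyGetD q i "" ++ "'>T</span>" ++
             (if i ≠ PySem.List.len q - 1 then "," else ""))))) (s0, o0)
    = (s0 ++ sjn ((PySem.List.pyRange 0 (PySem.List.len q)).map (fun i =>
         "<span style='color:" ++ (PySem.List.pyGetD q i "" ++ ("'>T</span>" ++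
           (if i ≠ PySem.List.len q - 1 then "," else ""))))),
       (List.range o0.length).map (fun k => o0.getD k "" ++
         sjn ((PySem.List.pyRange 0 (PySem.List.len q)).map (fun i =>
           if k = 2 then "<span style='color:" ++ (PySem.List.pyGetD q i "" ++ ("'>T</span>" ++
             (if i ≠ PySem.List.len q - 1 then "," else "")))
           else if (k : Int) = tgt i then "<span style='color:" ++ (PySem.List.pyGetD q i "" ++
             ("'>T</span>" ++ (if i ≠ PySem.List.len q - 1 then "_" else "")))
           else "___________________" ++
             (PySem.Str.join "" ((PySem.List.pyGetD q i "").toList.map (fun _ => "_")) ++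
               ("__________" ++ (if i ≠ PySem.List.len q - 1 then "_" else ""))))))) := by
  intro s0 o0
  rw [PySem.List.foldl_congr_mem _ _
    (fun (st : String × List String) i =>
      (st.1 ++ ("<span style='color:" ++ (PySem.List.pyGetD q i "" ++ ("'>T</span>" ++
         (if i ≠ PySem.List.len q - 1 then "," else "")))),
       (List.range st.2.length).map (fun k => st.2.getD k "" ++
         (if k = 2 then "<span style='color:" ++ (PySem.List.pyGetD q i "" ++ ("'>T</span>" ++
            (if i ≠ PySem.List.len q - 1 then "," else "")))
          else if (k : Int) = tgt i then "<span style='color:" ++ (PySem.List.pyGetD q i "" ++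
            ("'>T</span>" ++ (if i ≠ PySem.List.len q - 1 then "_" else "")))
          else "___________________" ++
            (PySem.Str.join "" ((PySem.List.pyGetD q i "").toList.map (fun _ => "_")) ++
              ("__________" ++ (if i ≠ PySem.List.len q - 1 then "_" else ""))))))) _ ?hstep]
  case hstep =>
    intro st i hi
    have hi0 : 0 ≤ i := by
      rw [PySem.List.len_eq] at hi
      exact (PySem.List.mem_pyRange_one.mp hi).1
    have hv : st.1 ++ "<span style='color:" ++ PySem.List.pyGetD q i "" ++ "'>T</span>" ++
        (if i ≠ PySem.List.len q - 1 then "," else "")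
        = st.1 ++ ("<span style='color:" ++ (PySem.List.pyGetD q i "" ++ ("'>T</span>" ++
          (if i ≠ PySem.List.len q - 1 then "," else "")))) := by
      simp only [String.append_assoc]
    have hv2 : PySem.List.pySetD st.2 2 (PySem.List.pyGetD st.2 2 "" ++
        "<span style='color:" ++ PySem.List.pyGetD q i "" ++ "'>T</span>" ++
        (if i ≠ PySem.List.len q - 1 then "," else ""))
        = PySem.List.pySetD st.2 2 (PySem.List.pyGetD st.2 2 "" ++
          ("<span style='color:" ++ (PySem.List.pyGetD q i "" ++ ("'>T</span>" ++
            (if i ≠ PySem.List.len q - 1 then "," else ""))))) := by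
      simp only [String.append_assoc]
    rw [Prod.mk.injEq]
    refine ⟨hv, ?_⟩
    rw [hv2, aJLoop_eq _ _ (htgt i hi0)]
  rw [pairfold]

theorem midloop_eq (o : List String) :
    (PySem.List.pyRange 0 (PySem.List.len o)).foldl (fun o' i =>
      if i ≠ 3 then PySem.List.pySetD o' i (PySem.List.pyGetD o' i "" ++ "_______________")
      else PySem.List.pySetD o' i (PySem.List.pyGetD o' i "" ++ "_______D_______")) o
    = (List.range o.length).map (fun k => o.getD k "" ++
        (if (k : Int) ≠ 3 then "_______________" else "_______D_______")) := by
  rw [PySem.List.foldl_congr_mem _ _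
    (fun o' i => PySem.List.pySetD o' i (PySem.List.pyGetD o' i "" ++
      (if i ≠ 3 then "_______________" else "_______D_______"))) _ ?hc]
  case hc =>
    intro o' i _
    by_cases h : i ≠ 3 <;> simp [h]
  exact master o _

theorem tailloop_eq (o : List String) :
    (PySem.List.pyRange 0 (PySem.List.len o)).foldl (fun o' i =>
      PySem.List.pySetD o' i (PySem.List.pyGetD o' i "" ++ "____")) o
    = (List.range o.length).map (fun k => o.getD k "" ++ "____") :=
  master o _

theorem map_range_collapse (o : List String) (f g : Nat → String) :
    (List.range ((List.range o.length).map (fun k => o.getD k "" ++ f k)).length).map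
      (fun k => ((List.range o.length).map (fun k' => o.getD k' "" ++ f k')).getD k "" ++ g k)
    = (List.range o.length).map (fun k => o.getD k "" ++ (f k ++ g k)) := by
  rw [show ((List.range o.length).map (fun k => o.getD k "" ++ f k)).length = o.length by simp]
  apply List.map_congr_left
  intro k hk
  rw [PySem.List.getD_map_range _ _ _ _ (List.mem_range.mp hk), String.append_assoc]

theorem foldl_append_const {α : Type} (l : List α) (s : String) (init : List String) :
    l.foldl (fun o _ => o ++ [s]) init = init ++ List.replicate l.length s := by
  induction l generalizing init with
  | nil => simp
  | cons x t ih =>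
      simp only [List.foldl_cons, ih, List.length_cons, List.replicate_succ, List.append_assoc,
        List.singleton_append]

theorem gap_assoc (c t : String) :
    "___________________" ++ (sjn (c.toList.map (fun _ => "_")) ++ ("__________" ++ t)) =
    bGap c ++ t := by
  apply String.ext
  unfold bGap
  rw [sjn_underscore]
  simp only [String.toList_append, String.toList_ofList]
  have h1 : (29 + PySem.Str.len c).toNat = 19 + (c.toList.length + 10) := by
    rw [show PySem.Str.len c = (c.toList.length : Int) from by simp]
    omega
  rw [h1, List.replicate_add, List.replicate_add]
  simp [show "___________________".toList = List.replicate 19 '_' from rfl,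
    show "__________".toList = List.replicate 10 '_' from rfl, List.append_assoc]

-- closed forms of A's body, phrased with the position dict / enumerate (proof-only)
def bListing (seq : List String) : String :=
  sjn ((PySem.List.enumerate seq).map (fun kc =>
    bSpan kc.2 ++ (if kc.1 ≠ PySem.List.len seq - 1 then "," else "")))

def bPos (colors : List String) : PySem.Dict String Int :=
  (PySem.List.enumerate colors).foldl (fun d kc => d.insert kc.2 kc.1) PySem.Dict.empty

def bRows (pos : PySem.Dict String Int) (L : Nat) (seq : List String) : List String :=
  (PySem.List.pyRange 0 (4 + (L : Int))).map (fun j =>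
    if j = 2 then bListing seq
    else sjn ((PySem.List.enumerate seq).map (fun kc =>
      (if j = pos.getD kc.2 0 + 4 then bSpan kc.2 else bGap kc.2) ++
      (if kc.1 ≠ PySem.List.len seq - 1 then "_" else ""))))

def bHeads (L : Nat) : List String :=
  ["___T_______________", "___________D_______", "___________________", "___________________"] ++
    List.replicate L "___________________"

def bMids (L : Nat) : List String :=
  (PySem.List.pyRange 0 (4 + (L : Int))).map (fun j =>
    if j ≠ 3 then "_______________" else "_______D_______")

def bBaseInput (colors : List String) : String :=
  "<p>T</p><p>T</p><p>" ++ bListing colors ++ "</p><p>T</p><p>"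

def bBaseRows (pos : PySem.Dict String Int) (colors : List String) : List String :=
  (PySem.List.pyRange 0 (4 + (colors.length : Int))).map (fun j =>
    PySem.List.pyGetD (bHeads colors.length) j "" ++
    PySem.List.pyGetD (bRows pos colors.length colors) j "" ++
    PySem.List.pyGetD (bMids colors.length) j "")

def bOutRows (pos : PySem.Dict String Int) (L : Nat) (base_rows : List String) (p : List String) : List String :=
  let pr := bRows pos L p
  (PySem.List.pyRange 0 (4 + (L : Int))).map (fun j =>
    PySem.List.pyGetD base_rows j "" ++ PySem.List.pyGetD pr j "" ++ "____")

theorem listing_eq (seq : List String) :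
    sjn ((PySem.List.pyRange 0 (PySem.List.len seq)).map (fun i =>
      "<span style='color:" ++ (PySem.List.pyGetD seq i "" ++ ("'>T</span>" ++
        (if i ≠ PySem.List.len seq - 1 then "," else ""))))) = bListing seq := by
  unfold bListing
  rw [PySem.List.enumerate_eq_map_pyRange seq "", List.map_map]
  apply congrArg
  apply List.map_congr_left
  intro i _
  simp only [Function.comp, bSpan, String.append_assoc]

theorem cast4 (L : Nat) : (4 + (L : Int)) = ((4 + L : Nat) : Int) := by push_cast; ring

theorem pyGetD_bMids (L k : Nat) (hk : k < 4 + L) :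
    PySem.List.pyGetD (bMids L) (k : Int) "" =
    (if (k : Int) ≠ 3 then "_______________" else "_______D_______") := by
  unfold bMids
  rw [cast4]
  exact PySem.List.pyGetD_map_pyRange _ _ _ _ hk

theorem pyGetD_bRows (pos : PySem.Dict String Int) (L : Nat) (seq : List String) (k : Nat)
    (hk : k < 4 + L) :
    PySem.List.pyGetD (bRows pos L seq) (k : Int) "" =
    (if (k : Int) = 2 then bListing seq
     else sjn ((PySem.List.enumerate seq).map (fun kc =>
       (if (k : Int) = pos.getD kc.2 0 + 4 then bSpan kc.2 else bGap kc.2) ++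
       (if kc.1 ≠ PySem.List.len seq - 1 then "_" else "")))) := by
  unfold bRows
  rw [cast4]
  exact PySem.List.pyGetD_map_pyRange _ _ _ _ hk

theorem bHeads_length (L : Nat) : (bHeads L).length = 4 + L := by simp [bHeads]; omega

theorem bBaseRows_getD (pos : PySem.Dict String Int) (it : List String) (k : Nat)
    (hk : k < 4 + it.length) :
    PySem.List.pyGetD (bBaseRows pos it) (k : Int) "" =
    PySem.List.pyGetD (bHeads it.length) (k : Int) "" ++
    PySem.List.pyGetD (bRows pos it.length it) (k : Int) "" ++
    PySem.List.pyGetD (bMids it.length) (k : Int) "" := by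
  unfold bBaseRows
  rw [cast4]
  exact PySem.List.pyGetD_map_pyRange _ _ _ _ hk

theorem bOutRows_eq (pos : PySem.Dict String Int) (L : Nat) (base : List String) (p : List String) :
    bOutRows pos L base p = (List.range (4 + L)).map (fun (k : Nat) =>
      PySem.List.pyGetD base ((k : Nat) : Int) "" ++ PySem.List.pyGetD (bRows pos L p) ((k : Nat) : Int) "" ++ "____") := by
  unfold bOutRows
  rw [cast4, PySem.List.pyRange_one, show ((((4 + L : Nat) : Int)) - 0).toNat = 4 + L by omega,
    List.map_map]
  apply List.map_congr_left
  intro k _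
  simp only [Function.comp, zero_add]

theorem row_eq (pos : PySem.Dict String Int) (q : List String) (tgt : Int → Int) (k : Nat)
    (hk2 : ¬((k : Int) = 2))
    (htgt : ∀ i0 : Nat, i0 < q.length → tgt (i0 : Int) = pos.getD (q.getD i0 "") 0 + 4) :
    sjn ((PySem.List.pyRange 0 (PySem.List.len q)).map (fun i =>
      if k = 2 then "<span style='color:" ++ (PySem.List.pyGetD q i "" ++ ("'>T</span>" ++
        (if i ≠ PySem.List.len q - 1 then "," else "")))
      else if (k : Int) = tgt i then "<span style='color:" ++ (PySem.List.pyGetD q i "" ++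
        ("'>T</span>" ++ (if i ≠ PySem.List.len q - 1 then "_" else "")))
      else "___________________" ++
        (PySem.Str.join "" ((PySem.List.pyGetD q i "").toList.map (fun _ => "_")) ++
          ("__________" ++ (if i ≠ PySem.List.len q - 1 then "_" else "")))))
    = sjn ((PySem.List.enumerate q).map (fun kc =>
        (if (k : Int) = pos.getD kc.2 0 + 4 then bSpan kc.2 else bGap kc.2) ++
        (if kc.1 ≠ PySem.List.len q - 1 then "_" else ""))) := by
  rw [PySem.List.enumerate_eq_map_pyRange q "", List.map_map]
  apply congrArg
  apply List.map_congr_left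
  intro i hi
  have hmem : 0 ≤ i ∧ i < (q.length : Int) := by
    rw [PySem.List.len_eq] at hi
    exact PySem.List.mem_pyRange_one.mp hi
  obtain ⟨i0, rfl⟩ : ∃ i0 : Nat, i = (i0 : Int) := ⟨i.toNat, by omega⟩
  have hi0 : i0 < q.length := by omega
  have hkn2 : ¬(k = 2) := by omega
  simp only [Function.comp, PySem.List.pyGetD_natCast, if_neg hkn2, htgt i0 hi0]
  by_cases h : (k : Int) = pos.getD (q.getD i0 "") 0 + 4
  · rw [if_pos h, if_pos h]
    simp only [bSpan, String.append_assoc]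
  · rw [if_neg h, if_neg h]
    exact gap_assoc _ _

theorem body_eq (it p : List String) (hlen : p.length = it.length)
    (hmem : ∀ c ∈ p, c ∈ it)
    (hpos : ∀ i, i < it.length → (bPos it).getD (it.getD i "") 0 = (i : Int))
    (hidx : ∀ c ∈ it, (((PySem.List.index? it c).getD 0 : Nat) : Int) = (bPos it).getD c 0) :
    aBody it p = (bBaseInput it ++ bListing p ++ "</p>",
                  bOutRows (bPos it) it.length (bBaseRows (bPos it) it) p) := by
  unfold aBody
  simp only []
  rw [foldl_append_const]
  rw [show (PySem.List.pyRange 0 (PySem.List.len p)).length = p.length by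
    rw [PySem.List.len_eq, PySem.List.length_pyRange_one]; omega]
  rw [show ["___T_______________", "___________D_______", "___________________",
      "___________________"] ++ List.replicate p.length "___________________" = bHeads p.length from rfl]
  rw [stageLoop_eq it (fun i => i + 4) (by intro i h; show (4:Int) ≤ i + 4; omega)]
  rw [midloop_eq]
  rw [map_range_collapse (bHeads p.length) _ _]
  rw [stageLoop_eq p
    (fun i => (((PySem.List.index? it (PySem.List.pyGetD p i "")).getD 0 : Nat) : Int) + 4)
    (by intro i _
        show (4:Int) ≤ (((PySem.List.index? it (PySem.List.pyGetD p i "")).getD 0 : Nat) : Int) + 4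
        omega)]
  rw [map_range_collapse (bHeads p.length) _ _]
  rw [tailloop_eq]
  rw [map_range_collapse (bHeads p.length) _ _]
  rw [Prod.mk.injEq]
  constructor
  · rw [listing_eq it, listing_eq p]
    unfold bBaseInput
    simp only [String.append_assoc]
  · rw [bOutRows_eq, bHeads_length, hlen]
    apply List.map_congr_left
    intro k hk
    have hk' : k < 4 + it.length := List.mem_range.mp hk
    rw [bBaseRows_getD _ _ _ hk', pyGetD_bRows _ _ _ _ hk', pyGetD_bRows _ _ _ _ hk',
      pyGetD_bMids _ _ hk', PySem.List.pyGetD_natCast]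
    by_cases hk2 : (k : Int) = 2
    · have hk2' : k = 2 := by omega
      subst hk2'
      simp only [Nat.cast_ofNat, reduceIte]
      rw [listing_eq it, listing_eq p]
      simp only [String.append_assoc]
    · rw [if_neg hk2, if_neg hk2]
      rw [row_eq (bPos it) it (fun i => i + 4) k hk2 (by
        intro i0 h
        show ((i0 : Int) + 4) = (bPos it).getD (it.getD i0 "") 0 + 4
        rw [hpos i0 h])]
      rw [row_eq (bPos it) p
        (fun i => (((PySem.List.index? it (PySem.List.pyGetD p i "")).getD 0 : Nat) : Int) + 4) k hk2 (by
        intro i0 h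
        show (((PySem.List.index? it (PySem.List.pyGetD p (i0 : Int) "")).getD 0 : Nat) : Int) + 4
          = (bPos it).getD (p.getD i0 "") 0 + 4
        rw [PySem.List.pyGetD_natCast]
        have hc : p.getD i0 "" ∈ it := by
          apply hmem
          rw [List.getD_eq_getElem _ _ h]
          exact List.getElem_mem _
        rw [hidx _ hc])]
      simp only [String.append_assoc]

theorem main_eq (it : List String) (r : Nat) (hr : r = it.length)
    (hpos : ∀ i, i < it.length → (bPos it).getD (it.getD i "") 0 = (i : Int))
    (hidx : ∀ c ∈ it, (((PySem.List.index? it c).getD 0 : Nat) : Int) = (bPos it).getD c 0) :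
    (PySem.List.permutations it r).foldl
      (fun acc p => (acc.1 ++ [(aBody it p).1], acc.2 ++ [(aBody it p).2])) ([], [])
    = ((PySem.List.permutations it r).map (fun p => bBaseInput it ++ bListing p ++ "</p>"),
       (PySem.List.permutations it r).map (fun p => bOutRows (bPos it) it.length (bBaseRows (bPos it) it) p)) := by
  rw [PySem.List.foldl_prod_mk (f := fun acc p => acc ++ [(aBody it p).1])
    (g := fun acc p => acc ++ [(aBody it p).2])]
  rw [PySem.List.foldl_append_singleton_eq_map (f := fun p => (aBody it p).1),
    PySem.List.foldl_append_singleton_eq_map (f := fun p => (aBody it p).2)]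
  rw [List.nil_append, List.nil_append, Prod.mk.injEq]
  constructor
  · apply List.map_congr_left
    intro q hq
    obtain ⟨hql, hqm⟩ := mem_permutations r it q hq
    rw [body_eq it q (by omega) hqm hpos hidx]
  · apply List.map_congr_left
    intro q hq
    obtain ⟨hql, hqm⟩ := mem_permutations r it q hq
    rw [body_eq it q (by omega) hqm hpos hidx]


-- ===== B-side lemmas =====

-- per-colour listing / row pieces of B, as structural recursions over the
-- (position, colour) pairs a DFS branch consumes
def listP : List (Int × String) → String
  | [] => ""
  | pc :: rest => (bSpan pc.2 ++ (if rest.isEmpty then "" else ",")) ++ listP rest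

def rowP (j : Int) : List (Int × String) → String
  | [] => ""
  | pc :: rest =>
      (if j = 2 then bSpan pc.2 ++ (if rest.isEmpty then "" else ",")
       else if j = pc.1 + 4 then bSpan pc.2 ++ (if rest.isEmpty then "" else "_")
       else bGap pc.2 ++ (if rest.isEmpty then "" else "_")) ++ rowP j rest

theorem enumMap (rows : List String) (g : Int → String) :
    (PySem.List.enumerate rows).map (fun jr => jr.2 ++ g jr.1)
    = (List.range rows.length).map (fun k => rows.getD k "" ++ g (k : Int)) := by
  rw [PySem.List.enumerate_eq_map_pyRange rows "", List.map_map, PySem.List.len_eq,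
    PySem.List.pyRange_one]
  rw [show (((rows.length : Int)) - 0).toNat = rows.length from by omega, List.map_map]
  apply List.map_congr_left
  intro k hk
  simp only [Function.comp, zero_add, PySem.List.pyGetD_natCast]

theorem bAppendSeq_eq (q : List (Int × String)) : ∀ (inp : String) (rows : List String),
    bAppendSeq q inp rows
    = (inp ++ listP q, (List.range rows.length).map (fun k => rows.getD k "" ++ rowP (k : Int) q)) := by
  induction q with
  | nil =>
      intro inp rows
      simp only [bAppendSeq, listP, rowP, String.append_empty]
      rw [map_range_getD_self]
  | cons pc rest ih =>
      intro inp rows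
      simp only [bAppendSeq, bExtend]
      rw [enumMap rows (g := fun j =>
        if j = 2 then bSpan pc.2 ++ (if rest.isEmpty then "" else ",")
        else if j = pc.1 + 4 then bSpan pc.2 ++ (if rest.isEmpty then "" else "_")
        else bGap pc.2 ++ (if rest.isEmpty then "" else "_")), ih]
      rw [map_range_collapse rows _ _, Prod.mk.injEq]
      constructor
      · simp only [listP, String.append_assoc]
      · rfl

theorem flatMap_attach {α β : Type} (l : List α) (H : α → List β) :
    l.attach.flatMap (fun t => H t.1) = l.flatMap H := by
  simp [List.flatMap_def]

theorem bDfs_eq : ∀ (r : Nat) (avail : List (Int × String)) (inp : String) (rows : List String),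
    bDfs avail (r : Int) inp rows =
      ((PySem.List.permutations avail r).map (fun q => (bAppendSeq q inp rows).1 ++ "</p>"),
       (PySem.List.permutations avail r).map (fun q => (bAppendSeq q inp rows).2.map (fun row => row ++ "____"))) := by
  intro r
  induction r with
  | zero =>
      intro avail inp rows
      rw [bDfs]
      simp [PySem.List.permutations, bAppendSeq]
  | succ r ih =>
      intro avail inp rows
      rw [bDfs, if_neg (by push_cast; omega : ¬((r + 1 : Nat) : Int) = 0)]
      rw [PySem.List.foldl_prod_mk
        (f := fun acc (t : {x // x ∈ List.range avail.length}) => acc ++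
          (bDfs (avail.take t.1 ++ avail.drop (t.1 + 1)) (((r + 1 : Nat) : Int) - 1)
            (bExtend inp rows (((r + 1 : Nat) : Int) == 1) (avail.getD t.1 (0, "")).1 (avail.getD t.1 (0, "")).2).1
            (bExtend inp rows (((r + 1 : Nat) : Int) == 1) (avail.getD t.1 (0, "")).1 (avail.getD t.1 (0, "")).2).2).1)
        (g := fun acc (t : {x // x ∈ List.range avail.length}) => acc ++
          (bDfs (avail.take t.1 ++ avail.drop (t.1 + 1)) (((r + 1 : Nat) : Int) - 1)
            (bExtend inp rows (((r + 1 : Nat) : Int) == 1) (avail.getD t.1 (0, "")).1 (avail.getD t.1 (0, "")).2).1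
            (bExtend inp rows (((r + 1 : Nat) : Int) == 1) (avail.getD t.1 (0, "")).1 (avail.getD t.1 (0, "")).2).2).2)]
      rw [PySem.List.foldl_append_eq_flatMap, PySem.List.foldl_append_eq_flatMap,
        List.nil_append, List.nil_append]
      simp only [PySem.List.permutations, List.map_flatMap]
      rw [flatMap_attach (List.range avail.length)
            (H := fun i => (bDfs (avail.take i ++ avail.drop (i + 1)) (((r + 1 : Nat) : Int) - 1)
              (bExtend inp rows (((r + 1 : Nat) : Int) == 1) (avail.getD i (0, "")).1 (avail.getD i (0, "")).2).1
              (bExtend inp rows (((r + 1 : Nat) : Int) == 1) (avail.getD i (0, "")).1 (avail.getD i (0, "")).2).2).1),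
          flatMap_attach (List.range avail.length)
            (H := fun i => (bDfs (avail.take i ++ avail.drop (i + 1)) (((r + 1 : Nat) : Int) - 1)
              (bExtend inp rows (((r + 1 : Nat) : Int) == 1) (avail.getD i (0, "")).1 (avail.getD i (0, "")).2).1
              (bExtend inp rows (((r + 1 : Nat) : Int) == 1) (avail.getD i (0, "")).1 (avail.getD i (0, "")).2).2).2)]
      have hcast : ((r + 1 : Nat) : Int) - 1 = (r : Nat) := by push_cast; ring
      have hpt : ∀ (i : Nat) (hi : i < avail.length), ∀ q ∈ PySem.List.permutations (avail.eraseIdx i) r,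
          bAppendSeq q
            (bExtend inp rows (((r + 1 : Nat) : Int) == 1) (avail.getD i (0, "")).1 (avail.getD i (0, "")).2).1
            (bExtend inp rows (((r + 1 : Nat) : Int) == 1) (avail.getD i (0, "")).1 (avail.getD i (0, "")).2).2
          = bAppendSeq (avail[i] :: q) inp rows := by
        intro i hi q hq
        have hql := (mem_permutations r _ q hq).1
        have hgd : avail.getD i (0, "") = avail[i] := List.getD_eq_getElem _ _ hi
        have hflag : (((r + 1 : Nat) : Int) == 1) = q.isEmpty := by
          cases q with
          | nil =>
              have hr : r = 0 := by simpa using hql.symm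
              subst hr; decide
          | cons a t =>
              simp only [List.isEmpty_cons]
              rw [beq_eq_false_iff_ne]
              intro hcon
              simp only [List.length_cons] at hql
              omega
        conv_rhs => rw [bAppendSeq]
        rw [hgd, hflag]
      rw [Prod.mk.injEq]
      constructor
      · apply List.flatMap_congr
        intro i hi
        have hi' : i < avail.length := List.mem_range.mp hi
        rw [← List.eraseIdx_eq_take_drop_succ, hcast, ih]
        rw [List.getElem?_eq_getElem hi']
        simp only [List.map_map]
        apply List.map_congr_left
        intro q hq
        simp only [Function.comp]
        rw [hpt i hi' q hq]
      · apply List.flatMap_congr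
        intro i hi
        have hi' : i < avail.length := List.mem_range.mp hi
        rw [← List.eraseIdx_eq_take_drop_succ, hcast, ih]
        rw [List.getElem?_eq_getElem hi']
        simp only [List.map_map]
        apply List.map_congr_left
        intro q hq
        simp only [Function.comp]
        rw [hpt i hi' q hq]

theorem listP_gen (q : List (Int × String)) : ∀ (s b : Int), b = s + (q.length : Int) - 1 →
    sjn ((PySem.List.enumerate (q.map (fun pc => pc.2)) s).map (fun kc =>
      bSpan kc.2 ++ (if kc.1 ≠ b then "," else ""))) = listP q := by
  induction q with
  | nil =>
      intro s b hb
      simp [PySem.List.enumerate_nil, sjn_nil, listP]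
  | cons pc rest ih =>
      intro s b hb
      simp only [List.map_cons, PySem.List.enumerate_cons, sjn_cons, listP]
      rw [ih (s + 1) b (by simp only [List.length_cons] at hb ⊢; push_cast at hb ⊢; omega)]
      congr 2
      cases rest with
      | nil =>
          have hsb : s = b := by simp at hb; omega
          simp [hsb]
      | cons a t =>
          have hsb : s ≠ b := by simp only [List.length_cons] at hb; push_cast at hb; omega
          simp [hsb]

theorem listP_bListing (q : List (Int × String)) :
    bListing (q.map (fun pc => pc.2)) = listP q := by
  unfold bListing
  exact listP_gen q 0 _ (by simp [PySem.List.len_eq])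

theorem rowP_two : ∀ (q : List (Int × String)), rowP 2 q = listP q := by
  intro q
  induction q with
  | nil => rfl
  | cons pc rest ih => simp [rowP, listP, ih]

theorem rowP_gen (pos : PySem.Dict String Int) (j : Int) (hj : ¬ j = 2) :
    ∀ (q : List (Int × String)) (s b : Int), b = s + (q.length : Int) - 1 →
    (∀ pc ∈ q, pos.getD pc.2 0 = pc.1) →
    sjn ((PySem.List.enumerate (q.map (fun pc => pc.2)) s).map (fun kc =>
      (if j = pos.getD kc.2 0 + 4 then bSpan kc.2 else bGap kc.2) ++
      (if kc.1 ≠ b then "_" else ""))) = rowP j q := by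
  intro q
  induction q with
  | nil =>
      intro s b hb hmem
      simp [PySem.List.enumerate_nil, sjn_nil, rowP]
  | cons pc rest ih =>
      intro s b hb hmem
      simp only [List.map_cons, PySem.List.enumerate_cons, sjn_cons, rowP]
      rw [ih (s + 1) b (by simp only [List.length_cons] at hb ⊢; push_cast at hb ⊢; omega)
        (fun pc' h => hmem pc' (List.mem_cons_of_mem _ h))]
      rw [hmem pc (List.mem_cons_self)]
      congr 1
      rw [if_neg hj]
      have hu : (if s ≠ b then "_" else "") = (if rest.isEmpty then "" else "_") := by
        cases rest with
        | nil =>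
            have hsb : s = b := by simp at hb; omega
            simp [hsb]
        | cons a t =>
            have hsb : s ≠ b := by simp only [List.length_cons] at hb; push_cast at hb; omega
            simp [hsb]
      rw [hu]
      by_cases h : j = pc.1 + 4
      · rw [if_pos h, if_pos h]
      · rw [if_neg h, if_neg h]

-- the colour prefix of the question
def itOf (n : Int) : List String :=
  PySem.List.slice ["red", "orange", "yellow", "green", "blue", "indigo", "violet"] none (some n)

theorem alt_eq (n m : Int) (hn : 0 ≤ n) :
    matching_question_generate_alt n m =
      ((PySem.List.permutations (PySem.List.enumerate (itOf n)) n.toNat).map (fun q =>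
         ("<p>T</p><p>T</p><p>" ++ listP (PySem.List.enumerate (itOf n)) ++ "</p><p>T</p><p>") ++
           listP q ++ "</p>"),
       (PySem.List.permutations (PySem.List.enumerate (itOf n)) n.toNat).map (fun q =>
         (List.range (4 + (itOf n).length)).map (fun k =>
           (bHeads (itOf n).length).getD k "" ++
             ((rowP (k : Int) (PySem.List.enumerate (itOf n)) ++
               (if (k : Int) = 3 then "_______D_______" else "_______________")) ++ rowP (k : Int) q) ++
             "____"))) := by
  obtain ⟨r, rfl⟩ : ∃ r : Nat, n = (r : Int) := ⟨n.toNat, by omega⟩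
  unfold matching_question_generate_alt
  simp only [Int.toNat_natCast, itOf]
  rw [show (["___T_______________", "___________D_______", "___________________", "___________________"] ++
      List.replicate (PySem.List.slice ["red", "orange", "yellow", "green", "blue", "indigo", "violet"] none (some ((r:Nat):Int))).length "___________________")
    = bHeads (PySem.List.slice ["red", "orange", "yellow", "green", "blue", "indigo", "violet"] none (some ((r:Nat):Int))).length from rfl]
  rw [bAppendSeq_eq]
  simp only []
  rw [enumMap _ (g := fun j => if j = 3 then "_______D_______" else "_______________")]
  rw [map_range_collapse _ _ (fun k => if ((k : Nat) : Int) = 3 then "_______D_______" else "_______________")]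
  rw [bDfs_eq r]
  rw [Prod.mk.injEq]
  refine ⟨?_, ?_⟩
  case _ =>
    apply List.map_congr_left
    intro q hq
    rw [bAppendSeq_eq]
  case _ =>
    apply List.map_congr_left
    intro q hq
    rw [bAppendSeq_eq]
    simp only []
    rw [map_range_collapse _ _ (fun k => rowP ((k : Nat) : Int) q)]
    simp only [List.map_map, Function.comp_def, bHeads_length]

theorem bridge (it : List String) (r : Nat)
    (hposE : ∀ pc ∈ PySem.List.enumerate it, (bPos it).getD pc.2 0 = pc.1) :
    ((PySem.List.permutations it r).map (fun p => bBaseInput it ++ bListing p ++ "</p>"),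
     (PySem.List.permutations it r).map (fun p => bOutRows (bPos it) it.length (bBaseRows (bPos it) it) p))
    = ((PySem.List.permutations (PySem.List.enumerate it) r).map (fun q =>
         ("<p>T</p><p>T</p><p>" ++ listP (PySem.List.enumerate it) ++ "</p><p>T</p><p>") ++
           listP q ++ "</p>"),
       (PySem.List.permutations (PySem.List.enumerate it) r).map (fun q =>
         (List.range (4 + it.length)).map (fun k =>
           (bHeads it.length).getD k "" ++
             ((rowP (k : Int) (PySem.List.enumerate it) ++
               (if (k : Int) = 3 then "_______D_______" else "_______________")) ++ rowP (k : Int) q) ++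
             "____"))) := by
  have hit : (PySem.List.enumerate it).map (fun pc => pc.2) = it := PySem.List.map_snd_enumerate it 0
  have hblit : bListing it = listP (PySem.List.enumerate it) := by
    conv_lhs => rw [← hit]
    exact listP_bListing _
  have hperm : PySem.List.permutations it r
      = (PySem.List.permutations (PySem.List.enumerate it) r).map (List.map (fun pc => pc.2)) := by
    conv_lhs => rw [← hit]
    exact permutations_map _ r _
  rw [hperm, List.map_map, List.map_map, Prod.mk.injEq]
  refine ⟨?_, ?_⟩
  · apply List.map_congr_left
    intro q hq
    simp only [Function.comp_def]
    rw [listP_bListing q]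
    unfold bBaseInput
    rw [hblit]
  · apply List.map_congr_left
    intro q hq
    obtain ⟨hql, hmemq⟩ := mem_permutations r _ q hq
    simp only [Function.comp_def]
    rw [bOutRows_eq]
    apply List.map_congr_left
    intro k hk
    have hk' : k < 4 + it.length := List.mem_range.mp hk
    rw [bBaseRows_getD _ _ _ hk', pyGetD_bRows _ _ _ _ hk',
      pyGetD_bRows _ _ (List.map (fun pc => pc.2) q) _ hk', pyGetD_bMids _ _ hk']
    rw [show PySem.List.pyGetD (bHeads it.length) ((k : Nat) : Int) "" = (bHeads it.length).getD k "" from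
      PySem.List.pyGetD_natCast _ _ _]
    have hmid : (if ((k : Nat) : Int) ≠ 3 then "_______________" else "_______D_______")
        = (if ((k : Nat) : Int) = 3 then "_______D_______" else "_______________") := by
      by_cases h : ((k : Nat) : Int) = 3 <;> simp [h]
    rw [hmid]
    by_cases hk2 : ((k : Nat) : Int) = 2
    · rw [if_pos hk2, if_pos hk2, hblit, listP_bListing q, hk2, rowP_two, rowP_two]
      simp only [String.append_assoc]
    · rw [if_neg hk2, if_neg hk2]
      have hrow_it : sjn ((PySem.List.enumerate it).map (fun kc =>
          (if ((k : Nat) : Int) = (bPos it).getD kc.2 0 + 4 then bSpan kc.2 else bGap kc.2) ++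
          (if kc.1 ≠ PySem.List.len it - 1 then "_" else "")))
          = rowP ((k : Nat) : Int) (PySem.List.enumerate it) := by
        have h := rowP_gen (bPos it) ((k : Nat) : Int) hk2 (PySem.List.enumerate it) 0
          (PySem.List.len it - 1)
          (by simp [PySem.List.len_eq, PySem.List.length_enumerate])
          hposE
        rw [hit] at h
        exact h
      have hrow_q : sjn ((PySem.List.enumerate (List.map (fun pc => pc.2) q)).map (fun kc =>
          (if ((k : Nat) : Int) = (bPos it).getD kc.2 0 + 4 then bSpan kc.2 else bGap kc.2) ++
          (if kc.1 ≠ PySem.List.len (List.map (fun pc => pc.2) q) - 1 then "_" else "")))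
          = rowP ((k : Nat) : Int) q := by
        exact rowP_gen (bPos it) ((k : Nat) : Int) hk2 q 0
          (PySem.List.len (List.map (fun pc => pc.2) q) - 1)
          (by simp [PySem.List.len_eq])
          (fun pc h => hposE pc (hmemq pc h))
      rw [hrow_it, hrow_q]
      simp only [String.append_assoc]

-- ===== VERDICT (by name: the statement is the Claim_ definition above) =====
theorem matching_question_generate_spec : Claim_equal_matching_question_generate := by
  intro n m hdom hpre
  unfold Pre_matching_question_generate at hpre
  unfold Spec_matching_question_generate
  rw [alt_eq n m hpre]
  unfold matching_question_generate
  by_cases hn : n ≤ 7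
  · interval_cases n <;>
      exact (main_eq _ _ (by decide) (by decide) (by decide)).trans
        (bridge _ _ (by decide))
  · have hit7 : (itOf n).length = 7 := by
      unfold itOf
      rw [PySem.List.slice_to _ hpre]
      simp only [List.length_take, List.length_cons, List.length_nil]
      omega
    have hA : PySem.List.permutations (itOf n) n.toNat = [] :=
      permutations_nil _ _ (by rw [hit7]; omega)
    have hB : PySem.List.permutations (PySem.List.enumerate (itOf n)) n.toNat = [] :=
      permutations_nil _ _ (by rw [PySem.List.length_enumerate, hit7]; omega)
    show (PySem.List.permutations (itOf n) n.toNat).foldl _ ([], []) = _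
    rw [hA, hB]
    simp
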